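-- pv_equiv track=rewrite | github.com/pypi-data/pypi-mirror-404 | packages/gsql2rsql/gsql2rsql-0.8.1.tar.gz/gsql2rsql-0.8.1/scripts/generate_readme.py | add_readme_header
-- ===== SOURCE A (Python) =====
-- def add_readme_header(content: str) -> str:
--     """Add README-specific header with badges."""
--     badges = """
-- [![PyPI version](https://badge.fury.io/py/gsql2rsql.svg)](https://badge.fury.io/py/gsql2rsql)
-- [![CI](https://github.com/devmessias/gsql2rsql/actions/workflows/ci.yml/badge.svg)](https://github.com/devmessias/gsql2rsql/actions/workflows/ci.yml)
-- [![Documentation](https://img.shields.io/badge/docs-mkdocs-blue)](https://devmessias.github.io/gsql2rsql)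
-- [![License: MIT](https://img.shields.io/badge/License-MIT-yellow.svg)](https://opensource.org/licenses/MIT)
--
-- """
--     lines = content.split("\n")
--     for i, line in enumerate(lines):
--         if line.startswith("# "):
--             lines.insert(i + 1, badges)
--             break
--
--     return "\n".join(lines)
-- ===== SOURCE B (Python) =====
-- def add_readme_header(content: str) -> str:
--     """Add README-specific header with badges."""
--     badges = """
-- [![PyPI version](https://badge.fury.io/py/gsql2rsql.svg)](https://badge.fury.io/py/gsql2rsql)
-- [![CI](https://github.com/devmessias/gsql2rsql/actions/workflows/ci.yml/badge.svg)](https://github.com/devmessias/gsql2rsql/actions/workflows/ci.yml)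
-- [![Documentation](https://img.shields.io/badge/docs-mkdocs-blue)](https://devmessias.github.io/gsql2rsql)
-- [![License: MIT](https://img.shields.io/badge/License-MIT-yellow.svg)](https://opensource.org/licenses/MIT)
--
-- """
--     # No splitting into lines: locate the first H1 directly in the string
--     # and splice the badges in after it.
--     if content.startswith("# "):
--         pos = 0
--     else:
--         nl = content.find("\n# ")
--         if nl == -1:
--             return content
--         pos = nl + 1
--     end = content.find("\n", pos)
--     if end == -1:
--         return content + "\n" + badges
--     return content[:end] + "\n" + badges + content[end:]
-- ===== Notes on version B (the rewrite author's own statement) =====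
-- stated objective: alternative
-- what changed: B never splits the content into a list of lines: it locates the start of the first H1 line directly with startswith/str.find, finds the end of that line with another find, and splices the badges in with two slices, instead of A's split/enumerate-scan/insert/join.
import Mathlib
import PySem

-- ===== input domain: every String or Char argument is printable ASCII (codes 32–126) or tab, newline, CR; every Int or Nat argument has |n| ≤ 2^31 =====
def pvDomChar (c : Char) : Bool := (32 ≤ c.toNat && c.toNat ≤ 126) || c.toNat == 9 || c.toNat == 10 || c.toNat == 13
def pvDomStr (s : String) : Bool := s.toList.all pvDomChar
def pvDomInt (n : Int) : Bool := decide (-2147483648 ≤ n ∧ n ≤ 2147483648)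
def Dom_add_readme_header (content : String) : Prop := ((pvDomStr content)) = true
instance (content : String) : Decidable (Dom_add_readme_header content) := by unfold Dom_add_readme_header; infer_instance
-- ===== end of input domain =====

-- B replaces A's split/scan/insert/join by locating the first H1 directly in the string
-- (startswith / find "\n# ") and splicing the badges in with two slices; same asymptotic cost.

def pvBadges : String := "\n[![PyPI version](https://badge.fury.io/py/gsql2rsql.svg)](https://badge.fury.io/py/gsql2rsql)\n[![CI](https://github.com/devmessias/gsql2rsql/actions/workflows/ci.yml/badge.svg)](https://github.com/devmessias/gsql2rsql/actions/workflows/ci.yml)\n[![Documentation](https://img.shields.io/badge/docs-mkdocs-blue)](https://devmessias.github.io/gsql2rsql)\n[![License: MIT](https://img.shields.io/badge/License-MIT-yellow.svg)](https://opensource.org/licenses/MIT)\n\n"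

-- ===== PORT A =====
-- A's for-loop with break: index of the first line that startswith "# "
def pvFindH1 : List String → Nat → Option Nat
  | [], _ => none
  | l :: ls, i => if PySem.Str.startswith l "# " then some i else pvFindH1 ls (i + 1)

def add_readme_header (content : String) : String :=
  let lines := (PySem.Str.split? content "\n").getD []
  let lines' :=
    match pvFindH1 lines 0 with
    | some i => PySem.List.insert lines ((i : Int) + 1) pvBadges
    | none => lines
  PySem.Str.join "\n" lines'

-- ===== PORT B =====
def add_readme_header_alt (content : String) : String :=
  let pos? : Option Int :=
    if PySem.Str.startswith content "# " then some 0
    else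
      let nl := PySem.Str.find content "\n# "
      if nl = -1 then none else some (nl + 1)
  match pos? with
  | none => content
  | some pos =>
    let e := PySem.Str.findFrom content "\n" pos
    if e = -1 then content ++ "\n" ++ pvBadges
    else PySem.Str.slice content none (some e) ++ "\n" ++ pvBadges ++ PySem.Str.slice content (some e) none

-- ===== PRECONDITION & SPEC =====
def Spec_add_readme_header (content : String) (out : String) : Prop := out = add_readme_header_alt content
instance (content : String) (out : String) : Decidable (Spec_add_readme_header content out) := by unfold Spec_add_readme_header; infer_instance

-- ===== CLAIM (what is proved, stated in full; the proofs are below) =====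
def Claim_equal_add_readme_header : Prop := ∀ (content : String), Dom_add_readme_header content → Spec_add_readme_header content (add_readme_header content)

-- ===== LEMMAS AND PROOFS =====

def pvBadgesL : List Char := pvBadges.toList

-- char-level mirror of B
def pvSplice (s : List Char) (pos : Int) : List Char :=
  let e := PySem.Chars.findFrom s ['\n'] pos none
  if e = -1 then s ++ '\n' :: pvBadgesL
  else PySem.Chars.slice s none (some e) ++ '\n' :: (pvBadgesL ++ PySem.Chars.slice s (some e) none)

def pvB (s : List Char) : List Char :=
  if PySem.Chars.startswith s ['#', ' '] then pvSplice s 0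
  else if PySem.Chars.find s ['\n', '#', ' '] = -1 then s
  else pvSplice s (PySem.Chars.find s ['\n', '#', ' '] + 1)

-- char-level mirror of A's insert-after-first-H1 (on the split lines)
def pvInsB : List (List Char) → List (List Char)
  | [] => []
  | l :: ls => if PySem.Chars.startswith l ['#', ' '] then l :: pvBadgesL :: ls else l :: pvInsB ls

-- String-level mirror of the same
def pvInsS : List String → List String
  | [] => []
  | l :: ls => if PySem.Str.startswith l "# " then l :: pvBadges :: ls else l :: pvInsS ls

lemma pvLitNl : ("\n" : String).toList = ['\n'] := rfl
lemma pvLitH : ("# " : String).toList = ['#', ' '] := rfl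
lemma pvLitNlH : ("\n# " : String).toList = ['\n', '#', ' '] := rfl

-- ---- find lemmas ----
lemma pvGoShift (sub : List Char) (l : List Char) : ∀ (k : Nat),
    PySem.Chars.find.go sub l k =
      if PySem.Chars.find.go sub l 0 = -1 then -1 else PySem.Chars.find.go sub l 0 + k := by
  induction l with
  | nil =>
    intro k
    by_cases h : sub.isEmpty <;> simp [PySem.Chars.find.go, h]
  | cons c rest IH =>
    intro k
    by_cases hp : sub.isPrefixOf (c :: rest) = true
    · simp [PySem.Chars.find.go, hp]
    · have hge : -1 ≤ PySem.Chars.find.go sub rest 0 := PySem.Chars.neg_one_le_find rest sub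
      simp only [PySem.Chars.find.go, hp, Bool.false_eq_true, ite_false]
      rw [IH (k + 1), IH 1]
      by_cases h0 : PySem.Chars.find.go sub rest 0 = -1
      · simp [h0]
      · simp only [h0, ite_false]
        rw [if_neg (by omega)]
        push_cast
        omega

lemma pvFindSingle (t u : List Char) (h : '\n' ∉ t) :
    PySem.Chars.find (t ++ '\n' :: u) ['\n'] = (t.length : Int) := by
  induction t with
  | nil => simp [PySem.Chars.find, PySem.Chars.find.go, List.isPrefixOf]
  | cons c t' IH =>
    have hc : c ≠ '\n' := fun hc => h (hc ▸ List.mem_cons_self)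
    have hp : (['\n'] : List Char).isPrefixOf (c :: (t' ++ '\n' :: u)) = false := by
      simp [List.isPrefixOf]; exact fun hh => absurd hh.symm hc
    have ht' : '\n' ∉ t' := fun hm => h (List.mem_cons_of_mem _ hm)
    have IH' := IH ht'
    simp only [PySem.Chars.find] at IH' ⊢
    simp only [List.cons_append, PySem.Chars.find.go, hp, Bool.false_eq_true, ite_false]
    rw [pvGoShift, IH']
    rw [if_neg (by omega)]
    simp only [List.length_cons]
    push_cast
    omega

lemma pvFindPat (t u : List Char) (h : '\n' ∉ t) :
    PySem.Chars.find (t ++ '\n' :: u) ['\n', '#', ' '] =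
      if PySem.Chars.startswith u ['#', ' '] then (t.length : Int)
      else if PySem.Chars.find u ['\n', '#', ' '] = -1 then -1
        else (t.length : Int) + 1 + PySem.Chars.find u ['\n', '#', ' '] := by
  induction t with
  | nil =>
    by_cases hs : PySem.Chars.startswith u ['#', ' ']
    · have hp : (['\n', '#', ' '] : List Char).isPrefixOf ('\n' :: u) = true := by
        simpa [List.isPrefixOf, PySem.Chars.startswith] using hs
      simp [PySem.Chars.find, PySem.Chars.find.go, hp, hs]
    · have hs' : PySem.Chars.startswith u ['#', ' '] = false := by simpa using hs
      have hp : (['\n', '#', ' '] : List Char).isPrefixOf ('\n' :: u) = false := by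
        simpa [List.isPrefixOf, PySem.Chars.startswith] using hs'
      have hge : -1 ≤ PySem.Chars.find.go ['\n', '#', ' '] u 0 :=
        PySem.Chars.neg_one_le_find u ['\n', '#', ' ']
      simp only [List.nil_append, PySem.Chars.find, PySem.Chars.find.go, hp, Bool.false_eq_true,
        ite_false, hs']
      rw [pvGoShift]
      by_cases h0 : PySem.Chars.find.go ['\n', '#', ' '] u 0 = -1
      · simp [h0]
      · simp only [h0, ite_false, List.length_nil]
        omega
  | cons c t' IH =>
    have hc : c ≠ '\n' := fun hc => h (hc ▸ List.mem_cons_self)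
    have hp : (['\n', '#', ' '] : List Char).isPrefixOf (c :: (t' ++ '\n' :: u)) = false := by
      simp [List.isPrefixOf]; exact fun hh => absurd hh.symm hc
    have ht' : '\n' ∉ t' := fun hm => h (List.mem_cons_of_mem _ hm)
    have IH' := IH ht'
    have hge : -1 ≤ PySem.Chars.find u ['\n', '#', ' '] :=
      PySem.Chars.neg_one_le_find u ['\n', '#', ' ']
    simp only [PySem.Chars.find] at IH' hge ⊢
    simp only [List.cons_append, PySem.Chars.find.go, hp, Bool.false_eq_true, ite_false]
    rw [pvGoShift, IH']
    by_cases hs : PySem.Chars.startswith u ['#', ' ']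
    · simp only [hs, ite_true]
      rw [if_neg (by omega)]
      simp only [List.length_cons]
      push_cast
      omega
    · have hs' : PySem.Chars.startswith u ['#', ' '] = false := by simpa using hs
      by_cases h0 : PySem.Chars.find.go ['\n', '#', ' '] u 0 = -1
      · simp [hs', h0]
      · simp only [hs', Bool.false_eq_true, ite_false, h0]
        rw [if_neg (by omega)]
        simp only [List.length_cons]
        push_cast
        omega

lemma pvFindNone (s sub : List Char) (hc : '\n' ∈ sub) (h : '\n' ∉ s) :
    PySem.Chars.find s sub = -1 := by
  rw [PySem.Chars.find_eq_neg_one_iff]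
  intro hinf
  exact h (hinf.subset hc)

lemma pvFindPos (u sub : List Char) (hsub : sub ≠ []) (h : PySem.Chars.find u sub ≠ -1) :
    0 ≤ PySem.Chars.find u sub ∧ (PySem.Chars.find u sub).toNat < u.length := by
  have hge : -1 ≤ PySem.Chars.find u sub := PySem.Chars.neg_one_le_find u sub
  have h0 : 0 ≤ PySem.Chars.find u sub := by omega
  refine ⟨h0, ?_⟩
  have hsp := (PySem.Chars.find_spec h0).1
  by_contra hlen
  push_neg at hlen
  rw [List.drop_eq_nil_of_le hlen] at hsp
  exact hsub (List.prefix_nil.mp hsp)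

-- ---- splitOn lemmas ----
lemma pvSplitGo : ∀ (fuel : Nat) (l cur : List Char) (acc : List (List Char)),
    l.length < fuel →
    PySem.Chars.splitOn.go ['\n'] fuel l cur acc =
      acc.reverse ++ List.modifyHead (cur.reverse ++ ·) (l.splitOn '\n') := by
  intro fuel
  induction fuel with
  | zero => intro l cur acc h; omega
  | succ f IH =>
    intro l cur acc h
    cases l with
    | nil => simp [PySem.Chars.splitOn.go, List.splitOn_nil]
    | cons c rest =>
      by_cases hc : c = '\n'
      · subst hc
        have hp : (['\n'] : List Char).isPrefixOf ('\n' :: rest) = true := by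
          simp [List.isPrefixOf]
        simp only [PySem.Chars.splitOn.go, hp, ite_true]
        have hdrop : List.drop (['\n'] : List Char).length ('\n' :: rest) = rest := by simp
        rw [hdrop, IH rest [] (cur.reverse :: acc) (by simpa using Nat.lt_of_succ_lt_succ h)]
        have hm : List.modifyHead (([] : List Char).reverse ++ ·) (rest.splitOn '\n') =
            rest.splitOn '\n' := by
          cases rest.splitOn '\n' <;> simp
        rw [hm]
        simp [List.splitOn, List.splitOnP_cons]
      · have hp : (['\n'] : List Char).isPrefixOf (c :: rest) = false := by
          simp [List.isPrefixOf]; exact fun hh => absurd hh.symm hc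
        simp only [PySem.Chars.splitOn.go, hp, Bool.false_eq_true, ite_false]
        rw [IH rest (c :: cur) acc (by simpa using Nat.lt_of_succ_lt_succ h)]
        have hsp : ((c :: rest).splitOn '\n') = List.modifyHead (c :: ·) (rest.splitOn '\n') := by
          simp [List.splitOn, List.splitOnP_cons, hc]
        rw [hsp, List.modifyHead_modifyHead]
        have hfun : (fun x => (c :: cur).reverse ++ x) =
            ((fun x => cur.reverse ++ x) ∘ (c :: ·)) := by
          funext a; simp
        rw [hfun]

lemma pvSplitEq (s : List Char) : PySem.Chars.splitOn s ['\n'] = s.splitOn '\n' := by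
  unfold PySem.Chars.splitOn
  rw [pvSplitGo (s.length + 1) s [] [] (by omega)]
  cases s.splitOn '\n' <;> simp

lemma pvSplitNoSep (t : List Char) (h : '\n' ∉ t) : t.splitOn '\n' = [t] := by
  induction t with
  | nil => simp [List.splitOn_nil]
  | cons c t' IH =>
    have hc : c ≠ '\n' := fun hc => h (hc ▸ List.mem_cons_self)
    have ht' : '\n' ∉ t' := fun hm => h (List.mem_cons_of_mem _ hm)
    simp only [List.splitOn] at IH ⊢
    rw [List.splitOnP_cons, IH ht']
    simp [hc]

lemma pvSplitChunk (t u : List Char) (h : '\n' ∉ t) :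
    (t ++ '\n' :: u).splitOn '\n' = t :: u.splitOn '\n' := by
  induction t with
  | nil => simp [List.splitOn, List.splitOnP_cons]
  | cons c t' IH =>
    have hc : c ≠ '\n' := fun hc => h (hc ▸ List.mem_cons_self)
    have ht' : '\n' ∉ t' := fun hm => h (List.mem_cons_of_mem _ hm)
    simp only [List.splitOn, List.cons_append] at IH ⊢
    rw [List.splitOnP_cons, IH ht']
    simp [hc]

lemma pvSplitNeNil (u : List Char) : u.splitOn '\n' ≠ [] := by
  induction u with
  | nil => simp [List.splitOn_nil]
  | cons c u' IH =>
    simp only [List.splitOn] at IH ⊢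
    rw [List.splitOnP_cons]
    by_cases hc : (c == '\n') = true
    · simp [hc]
    · simp only [hc, Bool.false_eq_true, ite_false]
      cases hX : List.splitOnP (fun x => x == '\n') u' with
      | nil => exact absurd hX IH
      | cons a b => simp

-- ---- intercalate lemmas ----
lemma pvInterSingle (x : List Char) : List.intercalate ['\n'] [x] = x := by
  simp [List.intercalate]

lemma pvInterConsCons (x y : List Char) (zs : List (List Char)) :
    List.intercalate ['\n'] (x :: y :: zs) = x ++ '\n' :: List.intercalate ['\n'] (y :: zs) := by
  simp [List.intercalate, List.intersperse]

lemma pvInterCons (x : List Char) (ys : List (List Char)) (h : ys ≠ []) :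
    List.intercalate ['\n'] (x :: ys) = x ++ '\n' :: List.intercalate ['\n'] ys := by
  cases ys with
  | nil => exact absurd rfl h
  | cons y zs => exact pvInterConsCons x y zs

lemma pvInsBNeNil (l0 : List Char) (L : List (List Char)) : pvInsB (l0 :: L) ≠ [] := by
  unfold pvInsB; split <;> simp

-- ---- startswith lemma ----
lemma pvSw (t u : List Char) :
    PySem.Chars.startswith (t ++ '\n' :: u) ['#', ' '] = PySem.Chars.startswith t ['#', ' '] := by
  match t with
  | [] => simp [PySem.Chars.startswith, List.isPrefixOf]
  | [c] => simp [PySem.Chars.startswith, List.isPrefixOf]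
  | c1 :: c2 :: t'' => simp [PySem.Chars.startswith, List.isPrefixOf]

-- ---- splice lemmas ----
lemma pvTakeApp (t u : List Char) (m : Nat) :
    List.take (t.length + 1 + m) (t ++ '\n' :: u) = t ++ '\n' :: List.take m u := by
  induction t with
  | nil =>
    have h : ([] : List Char).length + 1 + m = m + 1 := by
      simp only [List.length_nil]; omega
    rw [h, List.nil_append, List.take_succ_cons]
    simp
  | cons c t' IH =>
    have h : (c :: t').length + 1 + m = (t'.length + 1 + m) + 1 := by
      simp only [List.length_cons]; omega
    rw [h, List.cons_append, List.take_succ_cons, IH]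
    simp

lemma pvDropApp (t u : List Char) (m : Nat) :
    List.drop (t.length + 1 + m) (t ++ '\n' :: u) = List.drop m u := by
  induction t with
  | nil =>
    have h : ([] : List Char).length + 1 + m = m + 1 := by
      simp only [List.length_nil]; omega
    rw [h, List.nil_append, List.drop_succ_cons]
  | cons c t' IH =>
    have h : (c :: t').length + 1 + m = (t'.length + 1 + m) + 1 := by
      simp only [List.length_cons]; omega
    rw [h, List.cons_append, List.drop_succ_cons, IH]

lemma pvSpliceShift (t u : List Char) (k : Nat) (hk : k ≤ u.length) :
    pvSplice (t ++ '\n' :: u) ((t.length : Int) + 1 + (k : Int)) =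
      t ++ '\n' :: pvSplice u (k : Int) := by
  have hlen : (t ++ '\n' :: u).length = t.length + 1 + u.length := by
    simp [List.length_append]; omega
  unfold pvSplice
  have hcast : ((t.length : Int) + 1 + (k : Int)) = ((t.length + 1 + k : Nat) : Int) := by
    push_cast; ring
  rw [hcast]
  rw [PySem.Chars.findFrom_natCast _ _ (t.length + 1 + k) (by omega)]
  rw [PySem.Chars.findFrom_natCast _ _ k hk]
  have hdrop : List.drop (t.length + 1 + k) (t ++ '\n' :: u) = List.drop k u := pvDropApp t u k
  rw [hdrop]
  by_cases h0 : PySem.Chars.find (List.drop k u) ['\n'] = -1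
  · simp [h0]
  · have hr := pvFindPos (List.drop k u) ['\n'] (by simp) h0
    set r := PySem.Chars.find (List.drop k u) ['\n'] with hrdef
    have hrlen : r.toNat < u.length - k := by
      have := hr.2
      simp [List.length_drop] at this
      omega
    rw [if_neg h0, if_neg h0, if_neg (by omega), if_neg (by omega)]
    have e1 : ((t.length + 1 + k : Nat) : Int) + r = ((t.length + 1 + (k + r.toNat) : Nat) : Int) := by
      push_cast; omega
    have e2 : ((k : Nat) : Int) + r = ((k + r.toNat : Nat) : Int) := by
      push_cast; omega
    rw [e1, e2]
    simp only [PySem.Chars.slice_eq_listSlice]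
    rw [PySem.List.slice_to_natCast, PySem.List.slice_to_natCast,
      PySem.List.slice_from_natCast, PySem.List.slice_from_natCast]
    rw [pvTakeApp t u (k + r.toNat), pvDropApp t u (k + r.toNat)]
    simp

lemma pvSplice0 (t u : List Char) (hnt : '\n' ∉ t) :
    pvSplice (t ++ '\n' :: u) 0 = t ++ '\n' :: (pvBadgesL ++ '\n' :: u) := by
  unfold pvSplice
  have hf : PySem.Chars.findFrom (t ++ '\n' :: u) ['\n'] 0 none = (t.length : Int) := by
    rw [PySem.Chars.findFrom_zero]
    exact pvFindSingle t u hnt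
  rw [hf, if_neg (by omega)]
  simp only [PySem.Chars.slice_eq_listSlice]
  rw [PySem.List.slice_to_natCast, PySem.List.slice_from_natCast]
  rw [List.take_left, List.drop_left]

-- ---- master lemma ----
theorem pvMain (s : List Char) :
    List.intercalate ['\n'] (pvInsB (s.splitOn '\n')) = pvB s := by
  have H : ∀ (n : Nat) (s : List Char), s.length = n →
      List.intercalate ['\n'] (pvInsB (s.splitOn '\n')) = pvB s := by
    intro n
    induction n using Nat.strong_induction_on with
    | _ n IH =>
      intro s hn
      by_cases hmem : '\n' ∈ s
      · -- s = t ++ '\n' :: u with '\n' ∉ t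
        have hsplit := List.takeWhile_append_dropWhile (p := fun c => !(c == '\n')) (l := s)
        have hd : s.dropWhile (fun c => !(c == '\n')) ≠ [] := by
          intro hnil
          rw [hnil, List.append_nil] at hsplit
          have hm : '\n' ∈ s.takeWhile (fun c => !(c == '\n')) := by rw [hsplit]; exact hmem
          have := List.mem_takeWhile_imp hm
          simp at this
        obtain ⟨x, u, hx⟩ := List.exists_cons_of_ne_nil hd
        have hxnl : x = '\n' := by
          have h5 := List.head?_dropWhile_not (fun c => !(c == '\n')) s
          rw [hx] at h5
          simpa using h5
        set t := s.takeWhile (fun c => !(c == '\n')) with ht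
        have hs : s = t ++ '\n' :: u := by
          rw [← hsplit, hx, hxnl]
        have hnt : '\n' ∉ t := by
          intro hm
          have := List.mem_takeWhile_imp hm
          simp at this
        have hlen : t.length + 1 + u.length = n := by
          rw [← hn, hs]; simp [List.length_append]; omega
        have IHu : List.intercalate ['\n'] (pvInsB (u.splitOn '\n')) = pvB u :=
          IH u.length (by omega) u rfl
        rw [hs, pvSplitChunk t u hnt]
        by_cases hst : PySem.Chars.startswith t ['#', ' ']
        · obtain ⟨l0, L, hL⟩ : ∃ l0 L, u.splitOn '\n' = l0 :: L := by
            cases hsp : u.splitOn '\n' with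
            | nil => exact absurd hsp (pvSplitNeNil u)
            | cons a b => exact ⟨a, b, rfl⟩
          simp only [pvInsB, hst, ite_true]
          rw [hL, pvInterConsCons, pvInterConsCons, ← hL]
          rw [show List.intercalate ['\n'] (u.splitOn '\n') = ['\n'].intercalate (List.splitOn '\n' u) from rfl]
          rw [List.intercalate_splitOn]
          have hsws : PySem.Chars.startswith (t ++ '\n' :: u) ['#', ' '] = true := by
            rw [pvSw]; exact hst
          unfold pvB
          simp only [hsws, ite_true]
          rw [pvSplice0 t u hnt]
        · have hst' : PySem.Chars.startswith t ['#', ' '] = false := by simpa using hst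
          simp only [pvInsB, hst', Bool.false_eq_true, ite_false]
          have hins : pvInsB (u.splitOn '\n') ≠ [] := by
            obtain ⟨l0, L, hL⟩ : ∃ l0 L, u.splitOn '\n' = l0 :: L := by
              cases hsp : u.splitOn '\n' with
              | nil => exact absurd hsp (pvSplitNeNil u)
              | cons a b => exact ⟨a, b, rfl⟩
            rw [hL]; exact pvInsBNeNil l0 L
          rw [pvInterCons t _ hins, IHu]
          have hsws : PySem.Chars.startswith (t ++ '\n' :: u) ['#', ' '] = false := by
            rw [pvSw]; exact hst'
          unfold pvB
          simp only [hsws, Bool.false_eq_true, ite_false]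
          rw [pvFindPat t u hnt]
          by_cases hswu : PySem.Chars.startswith u ['#', ' ']
          · simp only [hswu, ite_true]
            rw [if_neg (by omega : ¬((t.length : Int) = -1))]
            -- reduce pvB u on the left
            have hsh := pvSpliceShift t u 0 (by omega)
            simp only [Nat.cast_zero, add_zero] at hsh
            rw [hsh]
          · have hswu' : PySem.Chars.startswith u ['#', ' '] = false := by simpa using hswu
            by_cases hfu : PySem.Chars.find u ['\n', '#', ' '] = -1
            · simp only [hswu', Bool.false_eq_true, ite_false, hfu, ite_true]
            · have hr := pvFindPos u ['\n', '#', ' '] (by simp) hfu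
              simp only [hswu', Bool.false_eq_true, ite_false, hfu, ite_false]
              rw [if_neg (by omega)]
              have hcast : PySem.Chars.find u ['\n', '#', ' '] + 1 =
                  (((PySem.Chars.find u ['\n', '#', ' ']).toNat + 1 : Nat) : Int) := by
                push_cast; omega
              have hcast2 : (t.length : Int) + 1 + PySem.Chars.find u ['\n', '#', ' '] + 1 =
                  (t.length : Int) + 1 + (((PySem.Chars.find u ['\n', '#', ' ']).toNat + 1 : Nat) : Int) := by
                push_cast; omega
              rw [hcast2, pvSpliceShift t u ((PySem.Chars.find u ['\n', '#', ' ']).toNat + 1) (by omega)]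
              rw [hcast]
      · rw [pvSplitNoSep s hmem]
        by_cases hsw : PySem.Chars.startswith s ['#', ' ']
        · simp only [pvInsB, hsw, ite_true]
          rw [pvInterConsCons, pvInterSingle]
          unfold pvB
          simp only [hsw, ite_true]
          unfold pvSplice
          rw [PySem.Chars.findFrom_zero, pvFindNone s ['\n'] (by simp) hmem]
          simp
        · have hsw' : PySem.Chars.startswith s ['#', ' '] = false := by simpa using hsw
          simp only [pvInsB, hsw', Bool.false_eq_true, ite_false]
          rw [pvInterSingle]
          unfold pvB
          rw [pvFindNone s ['\n', '#', ' '] (by simp) hmem]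
          simp [hsw']
  exact H s.length s rfl

-- ---- bridging A ----
lemma pvFindH1Shift (ls : List String) : ∀ (i : Nat),
    pvFindH1 ls i = (pvFindH1 ls 0).map (· + i) := by
  induction ls with
  | nil => intro i; simp [pvFindH1]
  | cons l ls IH =>
    intro i
    by_cases h : PySem.Str.startswith l "# " <;> simp only [pvFindH1, h, ite_true,
      Bool.false_eq_true, ite_false]
    · simp
    · rw [IH (i + 1), IH 1]
      cases pvFindH1 ls 0 with
      | none => simp
      | some j => simp; omega

lemma pvFindH1Lt (ls : List String) (j : Nat) (h : pvFindH1 ls 0 = some j) : j < ls.length := by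
  induction ls generalizing j with
  | nil => simp [pvFindH1] at h
  | cons l ls IH =>
    simp only [pvFindH1] at h
    by_cases hs : PySem.Str.startswith l "# " = true
    · rw [if_pos hs] at h
      have hj : j = 0 := by simpa using h.symm
      simp [hj, List.length_cons]
    · rw [if_neg hs] at h
      rw [pvFindH1Shift ls 1] at h
      cases hf : pvFindH1 ls 0 with
      | none => rw [hf] at h; simp at h
      | some j' =>
        rw [hf] at h
        simp at h
        have := IH j' hf
        simp only [List.length_cons]
        omega

lemma pvInsMatch (ls : List String) :
    (match pvFindH1 ls 0 with
      | some i => PySem.List.insert ls ((i : Int) + 1) pvBadges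
      | none => ls) = pvInsS ls := by
  induction ls with
  | nil => simp [pvFindH1, pvInsS]
  | cons l ls IH =>
    by_cases hs : PySem.Str.startswith l "# "
    · simp only [pvFindH1, hs, ite_true, pvInsS]
      rw [show ((0 : Nat) : Int) + 1 = ((1 : Nat) : Int) by norm_num]
      rw [PySem.List.insert_natCast (l :: ls) 1 pvBadges (by simp)]
      simp
    · simp only [pvFindH1, hs, Bool.false_eq_true, ite_false, pvInsS]
      rw [pvFindH1Shift ls 1]
      cases hf : pvFindH1 ls 0 with
      | none =>
        rw [hf] at IH
        simp only [Option.map_none]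
        exact congrArg (List.cons l) IH
      | some j =>
        rw [hf] at IH
        have hj : j < ls.length := pvFindH1Lt ls j hf
        simp only [Option.map_some]
        show PySem.List.insert (l :: ls) (((j + 1 : Nat) : Int) + 1) pvBadges = l :: pvInsS ls
        have IH' : List.take (j + 1) ls ++ pvBadges :: List.drop (j + 1) ls = pvInsS ls := by
          rw [← PySem.List.insert_natCast ls (j + 1) pvBadges (by omega)]
          rw [show ((j + 1 : Nat) : Int) = ((j : Nat) : Int) + 1 by push_cast; ring]
          exact IH
        rw [show ((j + 1 : Nat) : Int) + 1 = ((j + 2 : Nat) : Int) by push_cast; ring]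
        rw [PySem.List.insert_natCast (l :: ls) (j + 2) pvBadges (by simp only [List.length_cons]; omega)]
        simp only [List.take_succ_cons, List.drop_succ_cons, List.cons_append]
        rw [IH']

lemma pvInsSMap (ls : List String) :
    List.map String.toList (pvInsS ls) = pvInsB (List.map String.toList ls) := by
  induction ls with
  | nil => simp [pvInsS, pvInsB]
  | cons l ls IH =>
    by_cases hs : PySem.Str.startswith l "# "
    · have hc : PySem.Chars.startswith l.toList ['#', ' '] = true := by
        rw [← pvLitH, ← PySem.Str.startswith_eq]; exact hs
      simp [pvInsS, pvInsB, hs, hc, pvBadgesL]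
    · have hc : PySem.Chars.startswith l.toList ['#', ' '] = false := by
        rw [← pvLitH, ← PySem.Str.startswith_eq]; simpa using hs
      simp [pvInsS, pvInsB, hs, hc, IH]

lemma pvAToList (c : String) :
    (add_readme_header c).toList = List.intercalate ['\n'] (pvInsB (c.toList.splitOn '\n')) := by
  unfold add_readme_header
  have h := PySem.Str.split?_map c "\n"
  rw [pvLitNl] at h
  rw [show PySem.Chars.split? c.toList ['\n'] = some (PySem.Chars.splitOn c.toList ['\n']) from by
    simp [PySem.Chars.split?]] at h
  cases hsp : PySem.Str.split? c "\n" with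
  | none => rw [hsp] at h; simp at h
  | some ls =>
    rw [hsp] at h
    simp only [Option.map_some, Option.some_inj] at h
    simp only [hsp, Option.getD_some]
    rw [pvInsMatch ls, PySem.Str.toList_join, pvLitNl]
    rw [show PySem.Chars.join ['\n'] (List.map String.toList (pvInsS ls)) =
      List.intercalate ['\n'] (List.map String.toList (pvInsS ls)) from rfl]
    rw [pvInsSMap ls, h, pvSplitEq]

lemma pvBToList (c : String) : (add_readme_header_alt c).toList = pvB c.toList := by
  unfold add_readme_header_alt pvB pvSplice
  simp only [PySem.Str.startswith_eq, PySem.Str.find_eq, PySem.Str.findFrom_eq, pvLitH, pvLitNl,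
    pvLitNlH, PySem.Chars.findFrom_zero]
  by_cases h1 : PySem.Chars.startswith c.toList ['#', ' '] = true
  · simp only [h1, ite_true]
    by_cases h2 : PySem.Chars.find c.toList ['\n'] = -1
    · simp [h1, h2, pvBadgesL]
    · simp [h1, h2, pvBadgesL]
  · have h1' : PySem.Chars.startswith c.toList ['#', ' '] = false := by simpa using h1
    simp only [h1', Bool.false_eq_true, ite_false]
    by_cases h3 : PySem.Chars.find c.toList ['\n', '#', ' '] = -1
    · simp [h3]
    · simp only [h3, ite_false]
      by_cases h4 : PySem.Chars.findFrom c.toList ['\n']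
          (PySem.Chars.find c.toList ['\n', '#', ' '] + 1) none = -1
      · simp [h4, pvBadgesL]
      · simp [h4, pvBadgesL]

-- ===== VERDICT (by name: the statement is the Claim_ definition above) =====
theorem add_readme_header_spec : Claim_equal_add_readme_header := by
  intro content _
  unfold Spec_add_readme_header
  rw [← String.toList_inj, pvAToList, pvBToList, pvMain]
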